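-- pv_equiv track=rewrite | github.com/paercebal/py_generate_vs_project | paercebal/file_text.py | create_define
-- ===== SOURCE A (Python) =====
-- def create_define(p_name):
--     define_name = ''
--     is_previous_char_none = True
--     is_previous_char_underscore = False
--     is_previous_char_upper = False
--
--     for i in range(len(p_name)):
--         c = p_name[i]
--
--         if c == '_':
--             define_name += '_x_'
--             is_previous_char_upper = False
--             is_previous_char_underscore = True
--         elif c.upper() == c:
--             if is_previous_char_none:
--                 pass
--             elif not is_previous_char_upper:
--                 if not is_previous_char_underscore:
--                     define_name += '_'
--             define_name += c
--             is_previous_char_upper = True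
--             is_previous_char_underscore = False
--         else:
--             define_name += c.upper()
--             is_previous_char_upper = False
--             is_previous_char_underscore = False
--
--         is_previous_char_none = False
--
--     return define_name
-- ===== SOURCE B (Python) =====
-- def create_define(p_name):
--     # Stateless look-ahead: every char maps uniformly to a fixed piece;
--     # a separator '_' is emitted AFTER a lowercase char followed by an upper-eq char.
--     def piece(c):
--         return '_x_' if c == '_' else c.upper()
--     out = []
--     for c, nxt in zip(p_name, p_name[1:]):
--         out.append(piece(c))
--         if c != '_' and c.upper() != c and nxt != '_' and nxt.upper() == nxt:
--             out.append('_')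
--     if p_name:
--         out.append(piece(p_name[-1]))
--     return ''.join(out)
-- ===== Notes on version B (the rewrite author's own statement) =====
-- stated objective: alternative
-- what changed: Replaces A's stateful flag-driven pass (three maintained booleans deciding when to insert a separator before an upper char) with a stateless look-ahead over zip(s, s[1:]): each char maps uniformly to a fixed piece, and a separator is emitted after a lowercase char whose successor is a non-underscore upper-eq char.
import Mathlib
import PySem

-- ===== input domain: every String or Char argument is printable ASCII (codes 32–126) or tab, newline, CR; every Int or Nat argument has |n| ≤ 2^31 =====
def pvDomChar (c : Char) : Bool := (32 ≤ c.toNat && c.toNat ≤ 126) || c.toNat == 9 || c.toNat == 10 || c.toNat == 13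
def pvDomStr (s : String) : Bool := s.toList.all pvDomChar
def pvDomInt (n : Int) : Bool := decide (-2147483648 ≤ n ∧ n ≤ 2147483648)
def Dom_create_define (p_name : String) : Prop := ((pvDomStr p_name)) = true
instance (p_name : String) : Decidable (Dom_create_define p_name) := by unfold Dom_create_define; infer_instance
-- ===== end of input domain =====

-- B replaces A's flag-driven forward pass by a stateless look-ahead recursion (objective: alternative).

-- ===== PORT A =====
-- state: (define_name, is_previous_char_none, is_previous_char_underscore, is_previous_char_upper)
def create_define_step (st : List Char × Bool × Bool × Bool) (c : Char) : List Char × Bool × Bool × Bool :=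
  let dn := st.1; let isNone := st.2.1; let isUnder := st.2.2.1; let isUpper := st.2.2.2
  if c = '_' then
    (dn ++ ['_', 'x', '_'], false, true, false)
  else if PySem.Chars.upperChar c = c then
    let dn := if isNone then dn
              else if !isUpper then (if !isUnder then dn ++ ['_'] else dn)
              else dn
    (dn ++ [c], false, false, true)
  else
    (dn ++ [PySem.Chars.upperChar c], false, false, false)

def create_define (p_name : String) : String :=
  String.mk (p_name.toList.foldl create_define_step ([], true, false, false)).1

-- ===== PORT B =====
def pvPiece (c : Char) : List Char :=
  if c = '_' then ['_', 'x', '_'] else [PySem.Chars.upperChar c]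

def pvSep (c n : Char) : List Char :=
  if c ≠ '_' ∧ PySem.Chars.upperChar c ≠ c ∧ n ≠ '_' ∧ PySem.Chars.upperChar n = n
  then ['_'] else []

def create_define_alt (p_name : String) : String :=
  let cs := p_name.toList
  let body := (cs.zip cs.tail).foldl (fun acc (p : Char × Char) => acc ++ pvPiece p.1 ++ pvSep p.1 p.2) []
  String.mk (match cs.getLast? with
             | none => body
             | some c => body ++ pvPiece c)

-- ===== PRECONDITION & SPEC =====
def Spec_create_define (p_name : String) (out : String) : Prop := out = create_define_alt p_name
instance (p_name : String) (out : String) : Decidable (Spec_create_define p_name out) := by unfold Spec_create_define; infer_instance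

-- ===== CLAIM (what is proved, stated in full; the proofs are below) =====
def Claim_equal_create_define : Prop := ∀ (p_name : String), Dom_create_define p_name → Spec_create_define p_name (create_define p_name)

-- ===== LEMMAS AND PROOFS =====
-- proof-only recursive normal form of B's output
def create_define_alt_go : List Char → List Char
  | [] => []
  | [c] => pvPiece c
  | c :: n :: rest => pvPiece c ++ pvSep c n ++ create_define_alt_go (n :: rest)

def pvLast (cs : List Char) : List Char :=
  match cs.getLast? with | none => [] | some c => pvPiece c

theorem create_define_alt_zip (cs : List Char) :
    ∀ acc, (cs.zip cs.tail).foldl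
        (fun acc (p : Char × Char) => acc ++ pvPiece p.1 ++ pvSep p.1 p.2) acc ++ pvLast cs
      = acc ++ create_define_alt_go cs := by
  induction cs with
  | nil => intro acc; simp [pvLast, create_define_alt_go]
  | cons c rest ih =>
    intro acc
    cases rest with
    | nil => simp [pvLast, create_define_alt_go]
    | cons n r =>
      have hlast : pvLast (c :: n :: r) = pvLast (n :: r) := by
        simp [pvLast, List.getLast?_cons_cons]
      simp only [List.tail_cons, List.zip_cons_cons, List.foldl_cons, hlast]
      have ih' := ih (acc ++ pvPiece c ++ pvSep c n)
      simp only [List.tail_cons] at ih'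
      rw [ih']
      simp [create_define_alt_go, List.append_assoc]

-- A's flag triple after having just processed character p (none = start of string)
def pvEncode : Option Char → Bool × Bool × Bool
  | none => (true, false, false)
  | some p => (false, decide (p = '_'), decide (p ≠ '_' ∧ PySem.Chars.upperChar p = p))

-- the separator A has yet to emit, as a function of the previous char and the upcoming char
def pvPre : Option Char → Option Char → List Char
  | some p, some c => pvSep p c
  | _, _ => []

theorem upperChar_underscore : PySem.Chars.upperChar '_' = '_' := by decide

theorem create_define_loop (cs : List Char) :
    ∀ (acc : List Char) (prev : Option Char),
      (cs.foldl create_define_step (acc, pvEncode prev)).1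
        = acc ++ pvPre prev cs.head? ++ create_define_alt_go cs := by
  induction cs with
  | nil => intro acc prev; simp [create_define_alt_go, pvPre]
  | cons c rest ih =>
    intro acc prev
    have hstep : create_define_step (acc, pvEncode prev) c =
        (acc ++ pvPre prev (some c) ++ pvPiece c, pvEncode (some c)) := by
      by_cases hc : c = '_'
      · subst hc
        cases prev with
        | none => simp [create_define_step, pvEncode, pvPre, pvPiece, upperChar_underscore]
        | some p => simp [create_define_step, pvEncode, pvPre, pvSep, pvPiece, upperChar_underscore]
      · by_cases hu : PySem.Chars.upperChar c = c
        · cases prev with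
          | none => simp [create_define_step, pvEncode, pvPre, pvPiece, hc, hu]
          | some p =>
            by_cases hp : p = '_'
            · subst hp
              simp [create_define_step, pvEncode, pvPre, pvSep, pvPiece, hc, hu, upperChar_underscore]
            · by_cases hpu : PySem.Chars.upperChar p = p
              · simp [create_define_step, pvEncode, pvPre, pvSep, pvPiece, hc, hu, hp, hpu]
              · simp [create_define_step, pvEncode, pvPre, pvSep, pvPiece, hc, hu, hp, hpu]
        · have hcne : c ≠ '_' := by
            intro h; exact hu (by simp [h, upperChar_underscore])
          cases prev with
          | none => simp [create_define_step, pvEncode, pvPre, pvPiece, hcne, hu]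
          | some p => simp [create_define_step, pvEncode, pvPre, pvSep, pvPiece, hcne, hu]
    rw [List.foldl_cons, hstep, ih]
    cases rest with
    | nil => simp [create_define_alt_go, pvPre]
    | cons n r => simp [create_define_alt_go, pvPre, List.append_assoc]

-- ===== VERDICT (by name: the statement is the Claim_ definition above) =====
theorem create_define_spec : Claim_equal_create_define := by
  intro p_name _
  unfold Spec_create_define create_define create_define_alt
  have h := create_define_loop p_name.toList [] none
  simp only [pvEncode, pvPre, List.nil_append] at h
  rw [h]
  have h2 := create_define_alt_zip p_name.toList []
  simp only [List.nil_append] at h2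
  cases hcs : p_name.toList with
  | nil => simp [create_define_alt_go]
  | cons c rest =>
    rw [hcs] at h2
    obtain ⟨l, hl⟩ : ∃ l, (c :: rest).getLast? = some l := by
      cases hg : (c :: rest).getLast? with
      | none => simp at hg
      | some l => exact ⟨l, rfl⟩
    simp only [pvLast, hl] at h2
    simp only [hl]
    rw [h2]
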